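-- pv_equiv track=rewrite | github.com/Kenedy228/static-site-generator | src/common.py | block_to_header_block
-- ===== SOURCE A (Python) =====
-- def block_to_header_block(block):
--     prefix = "#"
--     count = 0
--
--     for i in range(0, len(block)):
--         if block[i] == prefix:
--             count += 1
--         else:
--             if count > 0 and count <= 6 and block[i] == " ":
--                 return True
--             return False
--     return False
-- ===== SOURCE B (Python) =====
-- def block_to_header_block(block):
--     return any(block.startswith("#" * k + " ") for k in range(1, 7))
-- ===== Notes on version B (the rewrite author's own statement) =====
-- stated objective: idiomatic
-- what changed: B does no counting at all: it matches the block against the six possible valid header prefixes ('# ' .. '###### ') with startswith, instead of A's scan that counts the leading '#' run and inspects the following character.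
import Mathlib
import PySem

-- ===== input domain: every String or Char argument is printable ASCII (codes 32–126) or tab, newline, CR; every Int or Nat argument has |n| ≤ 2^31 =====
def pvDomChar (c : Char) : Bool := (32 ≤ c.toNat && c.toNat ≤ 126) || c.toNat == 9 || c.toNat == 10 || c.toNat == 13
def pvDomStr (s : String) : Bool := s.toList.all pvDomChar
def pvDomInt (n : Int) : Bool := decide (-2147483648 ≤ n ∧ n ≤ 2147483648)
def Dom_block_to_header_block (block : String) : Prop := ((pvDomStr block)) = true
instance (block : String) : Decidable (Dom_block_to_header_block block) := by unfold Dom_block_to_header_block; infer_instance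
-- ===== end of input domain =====

-- B replaces A's counting scan by matching the block against the six possible
-- header prefixes with startswith (idiomatic; no counting state at all).

-- ===== PORT A =====
-- A's for-i-in-range loop with early returns, as structural recursion over the
-- characters with the same `count` state; the else-branch value is the early return.
def blockToHeaderGo : List Char → Nat → Bool
  | [], _ => false
  | c :: rest, count =>
      if c == '#' then blockToHeaderGo rest (count + 1)
      else decide (count > 0) && decide (count ≤ 6) && (c == ' ')

def block_to_header_block (block : String) : Bool :=
  blockToHeaderGo block.toList 0

-- ===== PORT B =====
-- Source B: any(block.startswith("#" * k + " ") for k in range(1, 7)).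
-- "#" * k + " " is ported as List.replicate k '#' ++ [' '] (exact), startswith as
-- PySem.Chars.startswith on the code points (exact).
def block_to_header_block_alt (block : String) : Bool :=
  (PySem.List.pyRange 1 7 1).any (fun k =>
    PySem.Chars.startswith block.toList (List.replicate k.toNat '#' ++ [' ']))

-- ===== PRECONDITION & SPEC =====
def Spec_block_to_header_block (block : String) (out : Bool) : Prop := out = block_to_header_block_alt block
instance (block : String) (out : Bool) : Decidable (Spec_block_to_header_block block out) := by unfold Spec_block_to_header_block; infer_instance

-- ===== CLAIM =====
def Claim_equal_block_to_header_block : Prop := ∀ (block : String), Dom_block_to_header_block block → Spec_block_to_header_block block (block_to_header_block block)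

-- ===== LEMMAS AND PROOFS =====

-- A's loop returns true iff some leading prefix "#"*k + " " (1 ≤ k+n actually) matches;
-- stated with the carried count n.
theorem blockToHeaderGo_iff (cs : List Char) (n : Nat) :
    blockToHeaderGo cs n = true ↔
      ∃ k : Nat, 1 ≤ n + k ∧ n + k ≤ 6 ∧ (List.replicate k '#' ++ [' ']) <+: cs := by
  induction cs generalizing n with
  | nil =>
      simp only [blockToHeaderGo]
      constructor
      · intro h; cases h
      · rintro ⟨k, _, _, h⟩
        rcases h with ⟨t, ht⟩
        cases k <;> simp at ht
  | cons c rest ih =>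
      by_cases hc : c = '#'
      · subst hc
        rw [show blockToHeaderGo ('#' :: rest) n = blockToHeaderGo rest (n + 1) from by
          simp [blockToHeaderGo]]
        rw [ih (n + 1)]
        constructor
        · rintro ⟨k, h1, h2, hp⟩
          refine ⟨k + 1, by omega, by omega, ?_⟩
          rcases hp with ⟨t, ht⟩
          exact ⟨t, by simp [List.replicate_succ, ht]⟩
        · rintro ⟨k, h1, h2, hp⟩
          cases k with
          | zero =>
              rcases hp with ⟨t, ht⟩
              simp at ht
          | succ m =>
              refine ⟨m, by omega, by omega, ?_⟩
              rcases hp with ⟨t, ht⟩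
              simp [List.replicate_succ] at ht
              exact ⟨t, by simp [ht]⟩
      · have hb : (c == '#') = false := by simp [hc]
        have hdef : blockToHeaderGo (c :: rest) n
            = (decide (n > 0) && decide (n ≤ 6) && (c == ' ')) := by
          simp [blockToHeaderGo, hb]
        rw [hdef]
        simp only [Bool.and_eq_true, decide_eq_true_eq, beq_iff_eq]
        constructor
        · rintro ⟨⟨h1, h2⟩, h3⟩
          subst h3
          exact ⟨0, by omega, by omega, ⟨rest, by simp⟩⟩
        · rintro ⟨k, h1, h2, hp⟩
          cases k with
          | zero =>
              rcases hp with ⟨t, ht⟩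
              simp at ht
              exact ⟨⟨by omega, by omega⟩, ht.1.symm⟩
          | succ m =>
              rcases hp with ⟨t, ht⟩
              simp [List.replicate_succ] at ht
              exact absurd ht.1.symm hc

theorem pyRange_1_7 : PySem.List.pyRange 1 7 1 = [1, 2, 3, 4, 5, 6] := by decide

-- ===== VERDICT =====
theorem block_to_header_block_spec : Claim_equal_block_to_header_block := by
  intro block _
  unfold Spec_block_to_header_block block_to_header_block block_to_header_block_alt
  rw [pyRange_1_7]
  rw [Bool.eq_iff_iff]
  rw [blockToHeaderGo_iff]
  simp only [List.any_eq_true, PySem.Chars.startswith_iff]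
  constructor
  · rintro ⟨k, h1, h2, hp⟩
    have hk : k = 1 ∨ k = 2 ∨ k = 3 ∨ k = 4 ∨ k = 5 ∨ k = 6 := by omega
    refine ⟨(k : Int), ?_, by simpa using hp⟩
    rcases hk with h|h|h|h|h|h <;> subst h <;> simp
  · rintro ⟨k, hk, hp⟩
    have hk' : k = 1 ∨ k = 2 ∨ k = 3 ∨ k = 4 ∨ k = 5 ∨ k = 6 := by simpa using hk
    rcases hk' with h|h|h|h|h|h <;> subst h <;>
      exact ⟨_, by decide, by decide, hp⟩
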